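-- pv_equiv track=rewrite | github.com/JuliKovalivker/TDV | RepresentacionDeGrafos/Esqueleto.py | grafo_rueda
-- ===== SOURCE A (Python) =====
-- def grafo_rueda(n: int) -> list[list[int]]:
--     """Dado un natural n >= 4 devolver la matriz de adyacencia de un grado rueda de n vértices.
--     Asumir que el nodo del centro es n-1 y los nodos del 0 hasta el n-2 forman en círculo en el orden 0-1-..-(n-2).
--     Ayuda: https://es.wikipedia.org/wiki/Grafo_rueda
--     Args:
--         n (int): Cantidad de vértices del grafo.
--
--     Returns:
--         List[List[int]]: La matriz de adyacencia de un grafo rueda.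
--     """
--     grafo = [[0 for _ in range(n)] for _ in range(n)]
--
--     for i in range(n-1):
--         grafo[n-1][i] = 1
--         grafo[i][n-1] = 1
--         if i == 0:
--             grafo[i][n-2] = 1
--             grafo[i][1] = 1
--         elif i == n-2:
--             grafo[i][0] = 1
--             grafo[i][n-3] = 1
--         else:
--             grafo[i][i-1] = 1
--             grafo[i][i+1] = 1
--
--     # grafo = []
--     # sub_lista = []
--     # for i in range(n-1):
--     #     if i == 0:
--     #         sub_lista.append(0)
--     #         sub_lista.append(1)
--     #         for j in range(2, n-2):
--     #             sub_lista.append(0)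
--     #         sub_lista.append(1)
--     #     elif i == n -2:
--     #         sub_lista.append(1)
--     #         for j in range(1, n-3):
--     #             sub_lista.append(0)
--     #         sub_lista.append(1)
--     #         sub_lista.append(0)
--     #     else:
--     #         for j in range(n-1):
--     #             if (j == i -1) or (j == i+ 1):
--     #                 sub_lista.append(1)
--     #             else:
--     #                 sub_lista.append(0)
--     #     sub_lista.append(1)
--     #     grafo.append(sub_lista)
--     #     sub_lista = []
--     # for i in range(n-1):
--     #     sub_lista.append(1)
--     # sub_lista.append(0)
--     # grafo.append(sub_lista)
--     # pass
--     return grafo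
-- ===== SOURCE B (Python) =====
-- def grafo_rueda(n: int) -> list[list[int]]:
--     """Edge-list-first rewrite: enumerate spokes and rim edges with modular
--     arithmetic, then fill the zero matrix symmetrically in one pass."""
--     edges = []
--     for i in range(n - 1):
--         edges.append((i, n - 1))            # spoke
--         edges.append((i, (i + 1) % (n - 1)))  # rim edge
--     grafo = [[0] * n for _ in range(n)]
--     for u, v in edges:
--         grafo[u][v] = 1
--         grafo[v][u] = 1
--     return grafo
-- ===== Notes on version B (the rewrite author's own statement) =====
-- stated objective: simpler
-- what changed: Replaces A's three-way branch cascade inside the fill loop by first enumerating an explicit edge list (spokes plus rim edges via (i+1) % (n-1)) and then one uniform symmetric pass setting grafo[u][v]=grafo[v][u]=1.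
import Mathlib
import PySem

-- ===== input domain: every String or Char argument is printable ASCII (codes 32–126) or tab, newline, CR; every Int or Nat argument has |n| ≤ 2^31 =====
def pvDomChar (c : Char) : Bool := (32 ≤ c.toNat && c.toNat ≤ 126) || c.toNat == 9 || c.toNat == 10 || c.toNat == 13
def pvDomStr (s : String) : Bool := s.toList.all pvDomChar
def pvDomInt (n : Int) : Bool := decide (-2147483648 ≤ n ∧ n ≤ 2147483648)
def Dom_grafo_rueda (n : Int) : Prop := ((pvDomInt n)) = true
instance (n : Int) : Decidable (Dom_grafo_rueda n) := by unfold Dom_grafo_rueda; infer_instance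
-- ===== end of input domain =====

-- B replaces A's three-way branch cascade by an explicit edge list (spokes plus modular rim edges)
-- followed by one uniform symmetric fill pass; objective: simpler.

-- `grafo[i][j] = 1`: exact for the nonnegative in-range indices both loops use
-- (every index written by either program lies in [0, n-1] and the matrix has n rows/cols).
def pvSet2 (g : List (List Int)) (i j : Int) : List (List Int) :=
  g.modify i.toNat (fun row => row.set j.toNat 1)

-- ===== PORT A =====
def grafo_rueda (n : Int) : List (List Int) :=
  (PySem.List.pyRange 0 (n - 1) 1).foldl
    (fun g i =>
      let g1 := pvSet2 g (n - 1) i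
      let g2 := pvSet2 g1 i (n - 1)
      if i = 0 then pvSet2 (pvSet2 g2 i (n - 2)) i 1
      else if i = n - 2 then pvSet2 (pvSet2 g2 i 0) i (n - 3)
      else pvSet2 (pvSet2 g2 i (i - 1)) i (i + 1))
    (List.replicate n.toNat (List.replicate n.toNat 0))

-- ===== PORT B =====
def grafo_rueda_alt (n : Int) : List (List Int) :=
  let edges := (PySem.List.pyRange 0 (n - 1) 1).foldl
      (fun es i => es ++ [(i, n - 1), (i, PySem.Int.mod (i + 1) (n - 1))]) []
  edges.foldl (fun g p => pvSet2 (pvSet2 g p.1 p.2) p.2 p.1)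
    (List.replicate n.toNat (List.replicate n.toNat 0))

-- ===== PRECONDITION & SPEC =====
def Spec_grafo_rueda (n : Int) (out : List (List Int)) : Prop := out = grafo_rueda_alt n
instance (n : Int) (out : List (List Int)) : Decidable (Spec_grafo_rueda n out) := by unfold Spec_grafo_rueda; infer_instance

-- ===== CLAIM (what is proved, stated in full; the proofs are below) =====
def Claim_equal_grafo_rueda : Prop := ∀ (n : Int), Dom_grafo_rueda n → Spec_grafo_rueda n (grafo_rueda n)

-- ===== LEMMAS AND PROOFS =====

-- entry at row i, column j (as options, so shape information is carried along)
def pvCell (m : List (List Int)) (i j : Nat) : Option Int := m[i]?.bind fun r => r[j]?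

-- apply a list of `[u][v] = 1` writes in order
def pvApply (m0 : List (List Int)) (L : List (Int × Int)) : List (List Int) :=
  L.foldl (fun m p => pvSet2 m p.1 p.2) m0

-- the cells A writes, per loop iteration, in A's order
def pvCellsA (n : Int) : List (Int × Int) :=
  (PySem.List.pyRange 0 (n - 1) 1).flatMap (fun i =>
    [(n - 1, i), (i, n - 1)] ++
      (if i = 0 then [(i, n - 2), (i, 1)]
       else if i = n - 2 then [(i, 0), (i, n - 3)]
       else [(i, i - 1), (i, i + 1)]))

-- the cells B writes, per rim vertex, in B's order
def pvCellsB (n : Int) : List (Int × Int) :=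
  (PySem.List.pyRange 0 (n - 1) 1).flatMap (fun i =>
    [(i, n - 1), (n - 1, i),
     (i, PySem.Int.mod (i + 1) (n - 1)), (PySem.Int.mod (i + 1) (n - 1), i)])

lemma pvApply_append (m0 : List (List Int)) (L L' : List (Int × Int)) :
    pvApply m0 (L ++ L') = pvApply (pvApply m0 L) L' := by
  simp [pvApply, List.foldl_append]

lemma pvFoldl_flatMap {α : Type} (f : α → List (Int × Int)) (L : List α) (m0 : List (List Int)) :
    L.foldl (fun m i => pvApply m (f i)) m0 = pvApply m0 (L.flatMap f) := by
  induction L generalizing m0 with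
  | nil => simp [pvApply]
  | cons x L ih => simp only [List.foldl_cons, List.flatMap_cons, pvApply_append, ih]

lemma grafo_rueda_eq_apply (n : Int) :
    grafo_rueda n =
      pvApply (List.replicate n.toNat (List.replicate n.toNat 0)) (pvCellsA n) := by
  unfold grafo_rueda pvCellsA
  rw [← pvFoldl_flatMap]
  refine PySem.List.foldl_congr_mem _ _ _ _ (fun m i _ => ?_)
  split_ifs <;> simp [pvApply]

lemma pvPairFold (E : List (Int × Int)) (m0 : List (List Int)) :
    E.foldl (fun g p => pvSet2 (pvSet2 g p.1 p.2) p.2 p.1) m0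
      = pvApply m0 (E.flatMap (fun p => [(p.1, p.2), (p.2, p.1)])) := by
  induction E generalizing m0 with
  | nil => rfl
  | cons p E ih =>
    simp only [List.foldl_cons, List.flatMap_cons, pvApply_append, ih]
    rfl

lemma grafo_rueda_alt_eq_apply (n : Int) :
    grafo_rueda_alt n =
      pvApply (List.replicate n.toNat (List.replicate n.toNat 0)) (pvCellsB n) := by
  unfold grafo_rueda_alt
  have hedges : ∀ (L : List Int) (es0 : List (Int × Int)),
      L.foldl (fun es i => es ++ [(i, n - 1), (i, PySem.Int.mod (i + 1) (n - 1))]) es0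
        = es0 ++ L.flatMap (fun i => [(i, n - 1), (i, PySem.Int.mod (i + 1) (n - 1))]) := by
    intro L
    induction L with
    | nil => intro es0; simp
    | cons x L ih => intro es0; simp [ih, List.flatMap_cons]
  rw [hedges, List.nil_append, pvPairFold, pvCellsB]
  congr 1
  generalize PySem.List.pyRange 0 (n - 1) 1 = L
  induction L with
  | nil => rfl
  | cons x L ih => simp [List.flatMap_cons, ih]

lemma pvCell_set2 (m : List (List Int)) (a b : Int) (i j : Nat) :
    pvCell (pvSet2 m a b) i j =
      if a.toNat = i ∧ b.toNat = j then (pvCell m i j).map (fun _ => 1)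
      else pvCell m i j := by
  unfold pvSet2 pvCell
  rw [List.getElem?_modify]
  cases hm : m[i]? with
  | none => simp
  | some r =>
    simp only [Option.map_eq_map, Option.map_some, Option.bind_some]
    by_cases ha : a.toNat = i
    · rw [if_pos ha]
      by_cases hb : b.toNat = j
      · subst hb
        have hset : (r.set b.toNat 1)[b.toNat]? =
            if b.toNat < r.length then some 1 else none := by
          rw [List.getElem?_set, if_pos rfl]
        rw [hset, if_pos (show a.toNat = i ∧ b.toNat = b.toNat from ⟨ha, rfl⟩)]
        cases hr : r[b.toNat]? with
        | none =>
          have hlen : r.length ≤ b.toNat := List.getElem?_eq_none_iff.mp hr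
          rw [if_neg (by omega)]; rfl
        | some v =>
          have hlt : b.toNat < r.length := (List.getElem?_eq_some_iff.mp hr).1
          rw [if_pos hlt]; rfl
      · have hset : (r.set b.toNat 1)[j]? = r[j]? := by
          rw [List.getElem?_set, if_neg hb]
        rw [hset, if_neg (fun h => hb h.2)]
    · rw [if_neg ha, if_neg (fun h => ha h.1)]

lemma pvCell_apply (L : List (Int × Int)) (m0 : List (List Int)) (i j : Nat) :
    pvCell (pvApply m0 L) i j =
      if (∃ p ∈ L, p.1.toNat = i ∧ p.2.toNat = j) then (pvCell m0 i j).map (fun _ => 1)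
      else pvCell m0 i j := by
  induction L generalizing m0 with
  | nil => simp [pvApply]
  | cons p L ih =>
    have hstep : pvApply m0 (p :: L) = pvApply (pvSet2 m0 p.1 p.2) L := rfl
    rw [hstep, ih, pvCell_set2]
    by_cases hp : p.1.toNat = i ∧ p.2.toNat = j
    · by_cases hL : ∃ q ∈ L, q.1.toNat = i ∧ q.2.toNat = j
      · simp [List.mem_cons, hp, hL, Option.map_map, Function.comp_def]
      · simp [List.mem_cons, hp, hL]
    · by_cases hL : ∃ q ∈ L, q.1.toNat = i ∧ q.2.toNat = j
      · simp [List.mem_cons, hp, hL]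
      · simp [List.mem_cons, hp, hL]

lemma pvApply_length (L : List (Int × Int)) (m0 : List (List Int)) :
    (pvApply m0 L).length = m0.length := by
  induction L generalizing m0 with
  | nil => rfl
  | cons p L ih =>
    have hstep : pvApply m0 (p :: L) = pvApply (pvSet2 m0 p.1 p.2) L := rfl
    rw [hstep, ih, pvSet2, List.length_modify]

lemma pvMatrix_ext (m m' : List (List Int)) (hl : m.length = m'.length)
    (h : ∀ i j, pvCell m i j = pvCell m' i j) : m = m' := by
  apply List.ext_getElem?
  intro i
  cases hm : m[i]? with
  | none =>
    have hle : m.length ≤ i := List.getElem?_eq_none_iff.mp hm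
    exact (List.getElem?_eq_none_iff.mpr (hl ▸ hle)).symm
  | some r =>
    have hi : i < m.length := by
      rcases Nat.lt_or_ge i m.length with hlt | hge
      · exact hlt
      · rw [List.getElem?_eq_none_iff.mpr hge] at hm; cases hm
    have hi' : i < m'.length := hl ▸ hi
    have hm' : m'[i]? = some m'[i] := List.getElem?_eq_getElem hi'
    rw [hm']
    congr 1
    apply List.ext_getElem?
    intro j
    have hcell := h i j
    simpa [pvCell, hm, hm'] using hcell

-- for rim vertex i in range, the modular successor is i+1, wrapping to 0 at i = n-2
lemma pvModSucc (n i : Int) (h0 : 0 ≤ i) (h1 : i < n - 1) :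
    PySem.Int.mod (i + 1) (n - 1) = if i = n - 2 then 0 else i + 1 := by
  have hpos : (0:Int) < n - 1 := by omega
  rw [PySem.Int.mod_eq_emod_of_pos hpos]
  by_cases h : i = n - 2
  · simp [h, show n - 2 + 1 = n - 1 by ring]
  · rw [if_neg h, Int.emod_eq_of_lt (by omega) (by omega)]

-- the two programs touch exactly the same set of cells
lemma pvCells_mem (n : Int) (p : Int × Int) : p ∈ pvCellsA n ↔ p ∈ pvCellsB n := by
  obtain ⟨a, b⟩ := p
  simp only [pvCellsA, pvCellsB, List.mem_flatMap, PySem.List.mem_pyRange_one]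
  constructor
  · rintro ⟨i, ⟨hi0, hi1⟩, hmem⟩
    have key : ∀ k : Int, 0 ≤ k → k < n - 1 →
        ((a = k ∧ b = n - 1) ∨ (a = n - 1 ∧ b = k) ∨
         (k = n - 2 ∧ ((a = k ∧ b = 0) ∨ (a = 0 ∧ b = k))) ∨
         (k ≠ n - 2 ∧ ((a = k ∧ b = k + 1) ∨ (a = k + 1 ∧ b = k)))) →
        ∃ i, (0 ≤ i ∧ i < n - 1) ∧ (a, b) ∈
          [(i, n - 1), (n - 1, i),
           (i, PySem.Int.mod (i + 1) (n - 1)), (PySem.Int.mod (i + 1) (n - 1), i)] := by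
      intro k hk0 hk1 hcase
      refine ⟨k, ⟨hk0, hk1⟩, ?_⟩
      rw [pvModSucc n k hk0 hk1]
      split_ifs with hk2 <;>
        simp only [List.mem_cons, List.not_mem_nil, or_false, Prod.mk.injEq] <;> omega
    rw [List.mem_append] at hmem
    rcases hmem with hmem | hmem
    · simp only [List.mem_cons, List.not_mem_nil, or_false, Prod.mk.injEq] at hmem
      exact key i hi0 hi1 (by omega)
    · split_ifs at hmem with h0 h2
      · -- i = 0 : A's cells (0, n-2) and (0, 1)
        subst h0
        simp only [List.mem_cons, List.not_mem_nil, or_false, Prod.mk.injEq] at hmem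
        rcases hmem with ⟨ha, hb⟩ | ⟨ha, hb⟩
        · exact key (n - 2) (by omega) (by omega) (by omega)
        · exact key 0 le_rfl (by omega) (by omega)
      · -- i = n - 2 (≠ 0) : A's cells (n-2, 0) and (n-2, n-3)
        subst h2
        simp only [List.mem_cons, List.not_mem_nil, or_false, Prod.mk.injEq] at hmem
        rcases hmem with ⟨ha, hb⟩ | ⟨ha, hb⟩
        · exact key (n - 2) (by omega) (by omega) (by omega)
        · exact key (n - 3) (by omega) (by omega) (by omega)
      · -- middle i : A's cells (i, i-1) and (i, i+1)
        simp only [List.mem_cons, List.not_mem_nil, or_false, Prod.mk.injEq] at hmem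
        rcases hmem with ⟨ha, hb⟩ | ⟨ha, hb⟩
        · exact key (i - 1) (by omega) (by omega) (by omega)
        · exact key i hi0 hi1 (by omega)
  · rintro ⟨i, ⟨hi0, hi1⟩, hmem⟩
    have key : ∀ k : Int, 0 ≤ k → k < n - 1 →
        ((a = n - 1 ∧ b = k) ∨ (a = k ∧ b = n - 1) ∨
         (k = 0 ∧ ((a = k ∧ b = n - 2) ∨ (a = k ∧ b = 1))) ∨
         (k = n - 2 ∧ k ≠ 0 ∧ ((a = k ∧ b = 0) ∨ (a = k ∧ b = n - 3))) ∨
         (k ≠ 0 ∧ k ≠ n - 2 ∧ ((a = k ∧ b = k - 1) ∨ (a = k ∧ b = k + 1)))) →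
        ∃ i, (0 ≤ i ∧ i < n - 1) ∧ (a, b) ∈
          ([(n - 1, i), (i, n - 1)] ++
            (if i = 0 then [(i, n - 2), (i, 1)]
             else if i = n - 2 then [(i, 0), (i, n - 3)]
             else [(i, i - 1), (i, i + 1)])) := by
      intro k hk0 hk1 hcase
      refine ⟨k, ⟨hk0, hk1⟩, ?_⟩
      rw [List.mem_append]
      split_ifs with hk0' hk2 <;>
        simp only [List.mem_cons, List.not_mem_nil, or_false, Prod.mk.injEq] <;> omega
    rw [pvModSucc n i hi0 hi1] at hmem
    simp only [List.mem_cons, List.not_mem_nil, or_false, Prod.mk.injEq] at hmem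
    split_ifs at hmem with h2
    · rcases hmem with ⟨ha, hb⟩ | ⟨ha, hb⟩ | ⟨ha, hb⟩ | ⟨ha, hb⟩
      · exact key i hi0 hi1 (by omega)
      · exact key i hi0 hi1 (by omega)
      · exact key i hi0 hi1 (by omega)
      · exact key 0 le_rfl (by omega) (by omega)
    · rcases hmem with ⟨ha, hb⟩ | ⟨ha, hb⟩ | ⟨ha, hb⟩ | ⟨ha, hb⟩
      · exact key i hi0 hi1 (by omega)
      · exact key i hi0 hi1 (by omega)
      · exact key i hi0 hi1 (by omega)
      · exact key (i + 1) (by omega) (by omega) (by omega)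

-- ===== VERDICT (by name: the statement is the Claim_ definition above) =====
theorem grafo_rueda_spec : Claim_equal_grafo_rueda := by
  intro n _
  unfold Spec_grafo_rueda
  rw [grafo_rueda_eq_apply, grafo_rueda_alt_eq_apply]
  apply pvMatrix_ext
  · rw [pvApply_length, pvApply_length]
  · intro i j
    rw [pvCell_apply, pvCell_apply]
    have hiff : (∃ p ∈ pvCellsA n, p.1.toNat = i ∧ p.2.toNat = j) ↔
        (∃ p ∈ pvCellsB n, p.1.toNat = i ∧ p.2.toNat = j) := by
      constructor
      · rintro ⟨p, hp, hpe⟩; exact ⟨p, (pvCells_mem n p).mp hp, hpe⟩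
      · rintro ⟨p, hp, hpe⟩; exact ⟨p, (pvCells_mem n p).mpr hp, hpe⟩
    split_ifs with h1 h2 h3
    · rfl
    · exact absurd (hiff.mp h1) h2
    · exact absurd (hiff.mpr h3) h1
    · rfl
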